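-- pv_equiv track=rewrite | github.com/sharram/hackathon | agent.py | make_log_excerpt
-- ===== SOURCE A (Python) =====
-- def make_log_excerpt(logs: str, max_lines: int = 30, max_chars: int = 1800) -> str:
--     lines = logs.splitlines()
--
--     # Prefer showing around the first helpful error
--     keywords = ["ModuleNotFoundError", "FileNotFoundError", "No such file or directory"]
--     idx = None
--     for k in keywords:
--         idx = next((i for i, l in enumerate(lines) if k in l), None)
--         if idx is not None:
--             break
--
--     if idx is None:
--         snippet = lines[:max_lines]
--     else:
--         start = max(0, idx - 10)
--         end = min(len(lines), idx + 10)
--         snippet = lines[start:end]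
--
--     text = "\n".join(snippet).strip()
--     if len(text) > max_chars:
--         text = text[:max_chars] + "\n... (truncated)"
--     return text
-- ===== SOURCE B (Python) =====
-- def make_log_excerpt(logs: str, max_lines: int = 30, max_chars: int = 1800) -> str:
--     lines = logs.splitlines()
--
--     keywords = ["ModuleNotFoundError", "FileNotFoundError", "No such file or directory"]
--     # Single pass: keep the best (keyword-priority rank, line index) seen so far;
--     # the rank only ever improves, and the first line achieving it wins.
--     best = None  # (rank, line index)
--     for i, line in enumerate(lines):
--         for r, k in enumerate(keywords):
--             if (best is None or r < best[0]) and k in line: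
--                 best = (r, i)
--                 break
--
--     if best is None:
--         snippet = lines[:max_lines]
--     else:
--         idx = best[1]
--         snippet = lines[max(0, idx - 10):min(len(lines), idx + 10)]
--
--     text = "\n".join(snippet).strip()
--     if len(text) > max_chars:
--         text = text[:max_chars] + "\n... (truncated)"
--     return text
-- ===== Notes on version B (the rewrite author's own statement) =====
-- stated objective: alternative
-- what changed: A runs up to three independent full scans of the lines, one per keyword in priority order; B makes a single pass over the lines maintaining the best (keyword-rank, first line index) pair and uses its index, keeping the identical window slicing and truncation.
import Mathlib
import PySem

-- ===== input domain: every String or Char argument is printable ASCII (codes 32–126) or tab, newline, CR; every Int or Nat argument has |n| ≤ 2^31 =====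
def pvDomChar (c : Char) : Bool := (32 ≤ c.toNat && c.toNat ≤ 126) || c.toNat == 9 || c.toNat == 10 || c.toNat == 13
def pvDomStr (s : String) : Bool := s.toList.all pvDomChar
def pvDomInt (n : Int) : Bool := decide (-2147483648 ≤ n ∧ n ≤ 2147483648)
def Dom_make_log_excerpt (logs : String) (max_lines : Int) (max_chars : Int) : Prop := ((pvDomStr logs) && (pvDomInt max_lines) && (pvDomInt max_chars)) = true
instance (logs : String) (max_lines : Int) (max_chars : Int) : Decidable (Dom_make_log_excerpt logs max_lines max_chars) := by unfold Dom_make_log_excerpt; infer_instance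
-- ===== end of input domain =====

-- B replaces A's three independent full scans over the lines (one per keyword) by a
-- single pass that maintains the best (keyword-priority rank, first line index) pair;
-- objective: alternative single-pass algorithm of similar cost.

-- ===== PORT A =====

-- next((i for i, l in enumerate(lines) if k in l), None), counting from i
def pvAfind (k : String) (ls : List String) (i : Int) : Option Int :=
  match ls with
  | [] => none
  | l :: rest => if PySem.Str.isIn k l then some i else pvAfind k rest (i + 1)

-- for k in keywords: idx = next(...); if idx is not None: break
def pvAloop (ks : List String) (lines : List String) : Option Int :=
  match ks with
  | [] => none
  | k :: rest =>
    match pvAfind k lines 0 with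
    | some i => some i
    | none => pvAloop rest lines

def make_log_excerpt (logs : String) (max_lines : Int) (max_chars : Int) : String :=
  let lines := PySem.Str.splitlines logs
  let idx := pvAloop ["ModuleNotFoundError", "FileNotFoundError", "No such file or directory"] lines
  let snippet :=
    match idx with
    | none => PySem.List.slice lines none (some max_lines)
    | some i =>
      let start := max 0 (i - 10)
      let stop := min (PySem.List.len lines) (i + 10)
      PySem.List.slice lines (some start) (some stop)
  let text := PySem.Str.strip (PySem.Str.join "\n" snippet)
  if PySem.Str.len text > max_chars then
    PySem.Str.slice text none (some max_chars) ++ "\n... (truncated)"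
  else text

-- ===== PORT B =====

-- inner loop: for r, k in enumerate(keywords): if (best is None or r < best[0]) and k in line: best = (r, i); break
def pvBinner (ks : List String) (r : Nat) (line : String) (i : Int) (best : Option (Nat × Int)) : Option (Nat × Int) :=
  match ks with
  | [] => best
  | k :: rest =>
    if (match best with | none => true | some b => decide (r < b.1)) && PySem.Str.isIn k line then
      some (r, i)
    else pvBinner rest (r + 1) line i best

-- outer loop: for i, line in enumerate(lines)
def pvBscan (ls : List String) (i : Int) (best : Option (Nat × Int)) : Option (Nat × Int) :=
  match ls with
  | [] => best
  | l :: rest => pvBscan rest (i + 1) (pvBinner ["ModuleNotFoundError", "FileNotFoundError", "No such file or directory"] 0 l i best)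

def make_log_excerpt_alt (logs : String) (max_lines : Int) (max_chars : Int) : String :=
  let lines := PySem.Str.splitlines logs
  let best := pvBscan lines 0 none
  let snippet :=
    match best with
    | none => PySem.List.slice lines none (some max_lines)
    | some b =>
      let idx := b.2
      PySem.List.slice lines (some (max 0 (idx - 10))) (some (min (PySem.List.len lines) (idx + 10)))
  let text := PySem.Str.strip (PySem.Str.join "\n" snippet)
  if PySem.Str.len text > max_chars then
    PySem.Str.slice text none (some max_chars) ++ "\n... (truncated)"
  else text

-- ===== PRECONDITION & SPEC =====
def Spec_make_log_excerpt (logs : String) (max_lines : Int) (max_chars : Int) (out : String) : Prop := out = make_log_excerpt_alt logs max_lines max_chars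
instance (logs : String) (max_lines : Int) (max_chars : Int) (out : String) : Decidable (Spec_make_log_excerpt logs max_lines max_chars out) := by unfold Spec_make_log_excerpt; infer_instance

-- ===== CLAIM (what is proved, stated in full; the proofs are below) =====
def Claim_equal_make_log_excerpt : Prop := ∀ (logs : String) (max_lines : Int) (max_chars : Int), Dom_make_log_excerpt logs max_lines max_chars → Spec_make_log_excerpt logs max_lines max_chars (make_log_excerpt logs max_lines max_chars)

-- ===== LEMMAS AND PROOFS =====

-- once best has rank 0, the scan never changes it
theorem pvBscan_zero (ls : List String) (i b : Int) :
    pvBscan ls i (some (0, b)) = some (0, b) := by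
  induction ls generalizing i with
  | nil => rfl
  | cons l rest ih => simp [pvBscan, pvBinner]; exact ih _

-- with best of rank 1, only the first keyword can still win
theorem pvBscan_one (ls : List String) (i b : Int) :
    pvBscan ls i (some (1, b)) =
      match pvAfind "ModuleNotFoundError" ls i with
      | some j => some (0, j)
      | none => some (1, b) := by
  induction ls generalizing i with
  | nil => rfl
  | cons l rest ih =>
    by_cases h0 : PySem.Str.isIn "ModuleNotFoundError" l = true
    · simp only [pvBscan, pvBinner, pvAfind, h0]
      simp [pvBscan_zero]
    · simp only [pvBscan, pvBinner, pvAfind, h0]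
      simp [ih]

-- with best of rank 2, the first two keywords can still win
theorem pvBscan_two (ls : List String) (i b : Int) :
    pvBscan ls i (some (2, b)) =
      match pvAfind "ModuleNotFoundError" ls i with
      | some j => some (0, j)
      | none =>
        match pvAfind "FileNotFoundError" ls i with
        | some j => some (1, j)
        | none => some (2, b) := by
  induction ls generalizing i with
  | nil => rfl
  | cons l rest ih =>
    by_cases h0 : PySem.Str.isIn "ModuleNotFoundError" l = true
    · simp only [pvBscan, pvBinner, pvAfind, h0]
      simp [pvBscan_zero]
    · by_cases h1 : PySem.Str.isIn "FileNotFoundError" l = true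
      · simp only [pvBscan, pvBinner, pvAfind, h0, h1]
        simp [pvBscan_one]
      · simp only [pvBscan, pvBinner, pvAfind, h0, h1]
        simp [ih]

-- the scan from an empty best equals A's priority chain of first-occurrence searches
theorem pvBscan_none (ls : List String) (i : Int) :
    pvBscan ls i none =
      match pvAfind "ModuleNotFoundError" ls i with
      | some j => some (0, j)
      | none =>
        match pvAfind "FileNotFoundError" ls i with
        | some j => some (1, j)
        | none =>
          match pvAfind "No such file or directory" ls i with
          | some j => some (2, j)
          | none => none := by
  induction ls generalizing i with
  | nil => rfl
  | cons l rest ih =>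
    by_cases h0 : PySem.Str.isIn "ModuleNotFoundError" l = true
    · simp only [pvBscan, pvBinner, pvAfind, h0]
      simp [pvBscan_zero]
    · by_cases h1 : PySem.Str.isIn "FileNotFoundError" l = true
      · simp only [pvBscan, pvBinner, pvAfind, h0, h1]
        simp [pvBscan_one]
      · by_cases h2 : PySem.Str.isIn "No such file or directory" l = true
        · simp only [pvBscan, pvBinner, pvAfind, h0, h1, h2]
          simp [pvBscan_two]
        · simp only [pvBscan, pvBinner, pvAfind, h0, h1, h2]
          simp [ih]

-- ===== VERDICT (by name: the statement is the Claim_ definition above) =====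
theorem make_log_excerpt_spec : Claim_equal_make_log_excerpt := by
  intro logs max_lines max_chars _
  unfold Spec_make_log_excerpt
  dsimp only [make_log_excerpt, make_log_excerpt_alt]
  rw [pvBscan_none]
  simp only [pvAloop]
  cases pvAfind "ModuleNotFoundError" (PySem.Str.splitlines logs) 0 with
  | some j => rfl
  | none =>
    cases pvAfind "FileNotFoundError" (PySem.Str.splitlines logs) 0 with
    | some j => rfl
    | none =>
      cases pvAfind "No such file or directory" (PySem.Str.splitlines logs) 0 with
      | some j => rfl
      | none => rfl
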